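-- pv_equiv track=rewrite | github.com/AyaanMansoorPal/Python | List Code.py | incorrect_answers
-- ===== SOURCE A (Python) =====
-- def incorrect_answers(correct,student_ans,i,n=0):
--     if n==len(student_ans):
--         return i
--     else:
--         if (correct[n]!=student_ans[n]) and (student_ans[n]!=""):
--             i=i+1
--             return incorrect_answers(correct[1:],student_ans[1:],i,n)
--         else:
--             return incorrect_answers(correct[1:],student_ans[1:],i,n)
-- ===== SOURCE B (Python) =====
-- def incorrect_answers(correct, student_ans, i, n=0):
--     wrong = 0
--     while n != len(student_ans):
--         if correct[n] != student_ans[n] != "":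
--             wrong += 1
--         n += 1
--     return i + wrong
-- ===== Notes on version B (the rewrite author's own statement) =====
-- stated objective: faster
-- what changed: Replaced the recursion that re-slices (copies) both lists at every step with a single iterative pass that advances the index and tallies mismatched non-blank answers in a counter.
import Mathlib
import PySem

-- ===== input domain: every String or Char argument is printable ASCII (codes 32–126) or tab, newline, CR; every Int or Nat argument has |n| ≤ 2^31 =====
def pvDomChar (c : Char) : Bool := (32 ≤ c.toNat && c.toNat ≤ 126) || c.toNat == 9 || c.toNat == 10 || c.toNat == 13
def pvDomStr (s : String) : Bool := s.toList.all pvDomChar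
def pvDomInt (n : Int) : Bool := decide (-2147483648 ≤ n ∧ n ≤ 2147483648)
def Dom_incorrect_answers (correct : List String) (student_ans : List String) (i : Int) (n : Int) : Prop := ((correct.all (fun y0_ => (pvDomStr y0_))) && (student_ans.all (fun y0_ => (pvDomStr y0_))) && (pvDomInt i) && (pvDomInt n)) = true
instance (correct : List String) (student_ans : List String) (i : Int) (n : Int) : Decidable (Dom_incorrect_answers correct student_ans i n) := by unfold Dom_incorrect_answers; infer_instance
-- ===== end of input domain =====

-- B replaces A's recursion (which copies both lists by slicing at every step) with one
-- in-place linear pass that advances the index n and counts mismatched non-blank answers.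

-- ===== PORT A =====
-- Where Python raises IndexError (pyGet? = none) the port returns 0; Pre_ excludes those inputs.
def incorrect_answers (correct : List String) (student_ans : List String) (i : Int) (n : Int) : Int :=
  if n = (student_ans.length : Int) then i
  else
    match hs : PySem.List.pyGet? student_ans n, PySem.List.pyGet? correct n with
    | some s, some c =>
        if c ≠ s ∧ s ≠ "" then
          incorrect_answers (PySem.List.slice correct (some 1) none)
            (PySem.List.slice student_ans (some 1) none) (i + 1) n
        else
          incorrect_answers (PySem.List.slice correct (some 1) none)
            (PySem.List.slice student_ans (some 1) none) i n
    | _, _ => 0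
termination_by student_ans.length
decreasing_by
  all_goals
    cases student_ans with
    | nil => simp [PySem.List.pyGet?] at hs
    | cons a t => simp [PySem.List.slice_from_one]

-- ===== PORT B =====
-- The while loop of B: advances n, accumulates the mismatch count in wrong.
-- Where Python raises IndexError (pyGet? = none) it returns 0; Pre_ excludes those inputs.
def incorrectAltLoop (correct : List String) (student_ans : List String) (n : Int) (wrong : Int) : Int :=
  if n = (student_ans.length : Int) then wrong
  else
    match PySem.List.pyGet? correct n with
    | none => 0
    | some c =>
      match ht : PySem.List.pyGet? student_ans n with
      | none => 0
      | some s =>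
          incorrectAltLoop correct student_ans (n + 1)
            (if c ≠ s ∧ s ≠ "" then wrong + 1 else wrong)
termination_by ((student_ans.length : Int) - n).toNat
decreasing_by
  have hr : ¬ (PySem.List.pyGet? student_ans n = none) := by simp [ht]
  rw [PySem.List.pyGet?_eq_none_iff, not_not] at hr
  simp only [PySem.Raise.InRange] at hr
  omega

def incorrect_answers_alt (correct : List String) (student_ans : List String) (i : Int) (n : Int) : Int :=
  i + incorrectAltLoop correct student_ans n 0

-- ===== PRECONDITION & SPEC =====
-- Exactly the inputs on which A returns (anything else raises IndexError or recurses forever):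
-- n must be a valid non-negative position in student_ans, and unless n is already its length
-- every compared index must exist in correct, i.e. correct is at least as long as student_ans.
def Pre_incorrect_answers (correct : List String) (student_ans : List String) (i : Int) (n : Int) : Prop :=
  0 ≤ n ∧ n ≤ student_ans.length ∧
    (n = student_ans.length ∨ student_ans.length ≤ correct.length)
instance (correct : List String) (student_ans : List String) (i : Int) (n : Int) : Decidable (Pre_incorrect_answers correct student_ans i n) := by unfold Pre_incorrect_answers; infer_instance

def pvWitness_incorrect_answers : List String × List String × Int × Int :=
  (["a", "b", "c"], ["a", "", "x"], 2, 1)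

def Spec_incorrect_answers (correct : List String) (student_ans : List String) (i : Int) (n : Int) (out : Int) : Prop := out = incorrect_answers_alt correct student_ans i n
instance (correct : List String) (student_ans : List String) (i : Int) (n : Int) (out : Int) : Decidable (Spec_incorrect_answers correct student_ans i n out) := by unfold Spec_incorrect_answers; infer_instance

-- ===== CLAIM (what is proved, stated in full; the proofs are below) =====
def Claim_equal_incorrect_answers : Prop := ∀ (correct : List String) (student_ans : List String) (i : Int) (n : Int), Dom_incorrect_answers correct student_ans i n → Pre_incorrect_answers correct student_ans i n → Spec_incorrect_answers correct student_ans i n (incorrect_answers correct student_ans i n)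

-- ===== LEMMAS AND PROOFS =====

-- Core invariant: on Pre_, A equals i plus the count over the zipped suffixes starting at n.
lemma incorrect_answers_eq_count (student_ans : List String) :
    ∀ (correct : List String) (i n : Int), 0 ≤ n → n ≤ student_ans.length →
    (n = student_ans.length ∨ student_ans.length ≤ correct.length) →
    incorrect_answers correct student_ans i n =
      i + ((correct.drop n.toNat).zip (student_ans.drop n.toNat)).countP
            (fun p => p.1 != p.2 && p.2 != "") := by
  induction student_ans with
  | nil =>
    intro correct i n h0 h1 _
    have hn : n = 0 := by simp at h1; omega
    subst hn
    rw [incorrect_answers]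
    simp
  | cons a t ih =>
    intro correct i n h0 h1 h2
    by_cases he : n = ((a :: t).length : Int)
    · rw [incorrect_answers, if_pos he]
      have hd : ((a :: t).drop n.toNat) = [] := List.drop_eq_nil_of_le (by omega)
      simp [hd]
    · have hlt : n < ((a :: t).length : Int) := lt_of_le_of_ne h1 he
      have hc : (a :: t).length ≤ correct.length := h2.resolve_left he
      have hms : n.toNat < (a :: t).length := by omega
      have hmc : n.toNat < correct.length := by omega
      have hsg : PySem.List.pyGet? (a :: t) n = some ((a :: t)[n.toNat]'hms) :=
        PySem.List.pyGet?_eq_some_getElem _ h0 (by omega)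
      have hcg : PySem.List.pyGet? correct n = some (correct[n.toNat]'hmc) :=
        PySem.List.pyGet?_eq_some_getElem _ h0 (by omega)
      have hds : (a :: t).drop n.toNat = (a :: t)[n.toNat]'hms :: (a :: t).drop (n.toNat + 1) :=
        List.drop_eq_getElem_cons hms
      have hdc : correct.drop n.toNat = correct[n.toNat]'hmc :: correct.drop (n.toNat + 1) :=
        List.drop_eq_getElem_cons hmc
      have htails : (a :: t).drop (n.toNat + 1) = t.drop n.toNat := List.drop_succ_cons ..
      have htailc : correct.tail.drop n.toNat = correct.drop (n.toNat + 1) := by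
        rw [← List.drop_one, List.drop_drop]; ring_nf
      have hpre1 : n ≤ (t.length : Int) := by simp at hlt; omega
      have hpre2 : n = (t.length : Int) ∨ t.length ≤ correct.tail.length := by
        right
        simp only [List.length_tail, List.length_cons] at hc ⊢
        omega
      rw [incorrect_answers, if_neg he, hsg, hcg]
      rw [hds, hdc, htails, List.zip_cons_cons, List.countP_cons]
      simp only [PySem.List.slice_from_one, List.tail_cons]
      by_cases hcond : correct[n.toNat]'hmc ≠ (a :: t)[n.toNat]'hms ∧ (a :: t)[n.toNat]'hms ≠ ""
      · rw [if_pos hcond, ih correct.tail (i + 1) n h0 hpre1 hpre2, htailc]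
        have hb : (correct[n.toNat]'hmc != (a :: t)[n.toNat]'hms &&
            (a :: t)[n.toNat]'hms != "") = true := by
          simp [hcond.1, hcond.2]
        simp only [hb, if_true]
        push_cast
        ring
      · rw [if_neg hcond, ih correct.tail i n h0 hpre1 hpre2, htailc]
        have hb : (correct[n.toNat]'hmc != (a :: t)[n.toNat]'hms &&
            (a :: t)[n.toNat]'hms != "") = false := by
          rw [Bool.eq_false_iff]
          intro hb'
          simp only [Bool.and_eq_true, bne_iff_ne] at hb'
          exact hcond hb'
        simp only [hb, Bool.false_eq_true, if_false]
        push_cast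
        ring

-- B's loop equals its starting count plus the mismatch count over the zipped suffixes.
lemma incorrectAltLoop_eq_count (correct student_ans : List String) :
    ∀ (m : Nat) (n wrong : Int), 0 ≤ n → n ≤ (student_ans.length : Int) →
    (n = (student_ans.length : Int) ∨ student_ans.length ≤ correct.length) →
    m = ((student_ans.length : Int) - n).toNat →
    incorrectAltLoop correct student_ans n wrong =
      wrong + ((correct.drop n.toNat).zip (student_ans.drop n.toNat)).countP
        (fun p => p.1 != p.2 && p.2 != "") := by
  intro m
  induction m with
  | zero =>
    intro n wrong h0 h1 _ hm
    have hn : n = (student_ans.length : Int) := by omega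
    rw [incorrectAltLoop.eq_def, if_pos hn]
    have hd : student_ans.drop n.toNat = [] := List.drop_eq_nil_of_le (by omega)
    simp [hd]
  | succ k ih =>
    intro n wrong h0 h1 h2 hm
    have hlt : n < (student_ans.length : Int) := by omega
    have hc : student_ans.length ≤ correct.length := h2.resolve_left (by omega)
    have hms : n.toNat < student_ans.length := by omega
    have hmc : n.toNat < correct.length := by omega
    rw [incorrectAltLoop.eq_def, if_neg (by omega)]
    rw [PySem.List.pyGet?_eq_some_getElem correct h0 (by omega),
      PySem.List.pyGet?_eq_some_getElem student_ans h0 (by omega)]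
    rw [List.drop_eq_getElem_cons hmc, List.drop_eq_getElem_cons hms,
      List.zip_cons_cons]
    simp only [List.countP_cons]
    rw [ih (n + 1) (if correct[n.toNat]'hmc ≠ student_ans[n.toNat]'hms ∧
          student_ans[n.toNat]'hms ≠ "" then wrong + 1 else wrong)
        (by omega) (by omega) (Or.inr hc) (by omega)]
    have h1n : (n + 1).toNat = n.toNat + 1 := by omega
    rw [h1n]
    by_cases hcond : correct[n.toNat]'hmc ≠ student_ans[n.toNat]'hms ∧
        student_ans[n.toNat]'hms ≠ ""
    · have hb : (correct[n.toNat]'hmc != student_ans[n.toNat]'hms &&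
          student_ans[n.toNat]'hms != "") = true := by
        simp [hcond.1, hcond.2]
      rw [if_pos hcond, hb]
      simp only [if_true]
      push_cast
      ring
    · have hb : (correct[n.toNat]'hmc != student_ans[n.toNat]'hms &&
          student_ans[n.toNat]'hms != "") = false := by
        rw [Bool.eq_false_iff]
        intro hb'
        simp only [Bool.and_eq_true, bne_iff_ne] at hb'
        exact hcond hb'
      rw [if_neg hcond, hb]
      simp only [Bool.false_eq_true, if_false]
      push_cast
      ring

-- ===== VERDICT (by name: the statement is the Claim_ definition above) =====
theorem incorrect_answers_spec : Claim_equal_incorrect_answers := by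
  intro correct student_ans i n _ hpre
  obtain ⟨h0, h1, h2⟩ := hpre
  unfold Spec_incorrect_answers incorrect_answers_alt
  rw [incorrect_answers_eq_count student_ans correct i n h0 h1 h2,
    incorrectAltLoop_eq_count correct student_ans
      ((student_ans.length : Int) - n).toNat n 0 h0 h1
      (by rcases h2 with he | hle
          · exact Or.inl (by exact_mod_cast he)
          · exact Or.inr hle) rfl]
  ring
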